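-- pv_equiv track=rewrite | github.com/patrikpusztai10/Graham-s-Scan | main.py | leftMostPoint
-- ===== SOURCE A (Python) =====
-- def leftMostPoint( intersections):
--     min = 0
--     for i in range(1, len(intersections)):
--         inter_x, inter_y = intersections[i]
--         min_x, min_y = intersections[min]
--         if inter_x < min_x:
--             min = i
--         elif inter_x == min_x and inter_y > min_y:
--             min = i
--     return min
-- ===== SOURCE B (Python) =====
-- def leftMostPoint(intersections):
--     if not intersections:
--         return 0
--     min_x = min(p[0] for p in intersections)
--     best = None
--     best_y = None
--     for i, (x, y) in enumerate(intersections):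
--         if x == min_x and (best is None or y > best_y):
--             best = i
--             best_y = y
--     return best
-- ===== Notes on version B (the rewrite author's own statement) =====
-- stated objective: alternative
-- what changed: B replaces A's single index-tracking scan with a combined lexicographic comparison by a reduce computing min_x followed by a filtered scan that tracks the earliest index of the strictly greatest y among points with x == min_x.
import Mathlib
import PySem

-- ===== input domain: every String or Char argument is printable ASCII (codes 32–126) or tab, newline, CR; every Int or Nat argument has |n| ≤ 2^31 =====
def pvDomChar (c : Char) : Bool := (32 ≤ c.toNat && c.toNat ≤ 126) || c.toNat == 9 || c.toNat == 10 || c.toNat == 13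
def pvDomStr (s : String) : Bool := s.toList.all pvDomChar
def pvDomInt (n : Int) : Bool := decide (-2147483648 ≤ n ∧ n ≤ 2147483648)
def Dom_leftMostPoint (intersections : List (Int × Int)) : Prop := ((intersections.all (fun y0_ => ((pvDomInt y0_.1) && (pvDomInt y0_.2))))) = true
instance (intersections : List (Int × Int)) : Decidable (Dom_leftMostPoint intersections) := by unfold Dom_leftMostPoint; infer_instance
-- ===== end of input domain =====

-- B splits A's single lexicographic index-tracking scan into a min_x reduce plus a
-- filtered scan over the points with x = min_x (objective: alternative decomposition).

-- ===== PORT A =====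
-- indices i and min are always in range, so pyGetD is exactly Python's indexing here
def leftMostPoint (intersections : List (Int × Int)) : Int :=
  (PySem.List.pyRange 1 (PySem.List.len intersections) 1).foldl
    (fun mn i =>
      let inter := PySem.List.pyGetD intersections i (0, 0)
      let mp := PySem.List.pyGetD intersections mn (0, 0)
      if inter.1 < mp.1 then i
      else if inter.1 = mp.1 ∧ inter.2 > mp.2 then i
      else mn) 0

-- ===== PORT B =====
def leftMostPoint_alt (intersections : List (Int × Int)) : Int :=
  match intersections with
  | [] => 0
  | p :: rest =>
    let min_x := rest.foldl (fun acc q => min acc q.1) p.1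
    let best := (PySem.List.enumerate (p :: rest) 0).foldl
      (fun (b : Option (Int × Int)) iq =>
        if iq.2.1 == min_x && (match b with | none => true | some bp => decide (bp.2 < iq.2.2))
        then some (iq.1, iq.2.2) else b) none
    -- best is the Python pair (best, best_y); it is never None since min_x is attained
    match best with
    | some (i, _) => i
    | none => 0

-- ===== PRECONDITION & SPEC =====
def Spec_leftMostPoint (intersections : List (Int × Int)) (out : Int) : Prop := out = leftMostPoint_alt intersections
instance (intersections : List (Int × Int)) (out : Int) : Decidable (Spec_leftMostPoint intersections out) := by unfold Spec_leftMostPoint; infer_instance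

-- ===== CLAIM (what is proved, stated in full; the proofs are below) =====
def Claim_equal_leftMostPoint : Prop := ∀ (intersections : List (Int × Int)), Dom_leftMostPoint intersections → Spec_leftMostPoint intersections (leftMostPoint intersections)

-- ===== LEMMAS AND PROOFS =====

-- total access used by the proofs
def pvG (xs : List (Int × Int)) (j : Nat) : Int × Int := xs.getD j (0, 0)

-- strict "better point" order: smaller x, or equal x and larger y
def pvBetter (p q : Int × Int) : Prop := p.1 < q.1 ∨ (p.1 = q.1 ∧ q.2 < p.2)

-- the common characterisation of both results: first index attaining the optimum
def pvFirstBest (xs : List (Int × Int)) (k : Nat) : Prop :=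
  k < xs.length ∧ (∀ j, j < xs.length → ¬ pvBetter (pvG xs j) (pvG xs k)) ∧
    (∀ j, j < k → pvBetter (pvG xs k) (pvG xs j))

lemma pvFirstBest_uniq {xs : List (Int × Int)} {k k' : Nat}
    (h : pvFirstBest xs k) (h' : pvFirstBest xs k') : k = k' := by
  obtain ⟨hk, hno, hst⟩ := h
  obtain ⟨hk', hno', hst'⟩ := h'
  rcases lt_trichotomy k k' with hlt | heq | hgt
  · exact absurd (hst' k hlt) (hno k' hk')
  · exact heq
  · exact absurd (hst k' hgt) (hno' k hk)

lemma pvG_mem {xs : List (Int × Int)} {j : Nat} (h : j < xs.length) : pvG xs j ∈ xs := by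
  simp [pvG, List.getD_eq_getElem?_getD, List.getElem?_eq_getElem h]

-- A's loop invariant, by induction on the remaining range
lemma A_loop (xs : List (Int × Int)) :
    ∀ (n a m : Nat), xs.length - a = n → m < a → a ≤ xs.length →
    (∀ j, j < a → ¬ pvBetter (pvG xs j) (pvG xs m)) →
    (∀ j, j < m → pvBetter (pvG xs m) (pvG xs j)) →
    ∃ r : Nat,
      ((PySem.List.pyRange (a : Int) (xs.length : Int) 1).foldl
        (fun mn i =>
          let inter := PySem.List.pyGetD xs i (0, 0)
          let mp := PySem.List.pyGetD xs mn (0, 0)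
          if inter.1 < mp.1 then i
          else if inter.1 = mp.1 ∧ inter.2 > mp.2 then i
          else mn) (m : Int)) = (r : Int) ∧ pvFirstBest xs r := by
  intro n
  induction n with
  | zero =>
    intro a m hn hma hax h1 h2
    have ha : a = xs.length := by omega
    rw [PySem.List.pyRange_one_eq_nil (by exact_mod_cast le_of_eq ha.symm)]
    exact ⟨m, rfl, by omega, by rw [← ha]; exact h1, h2⟩
  | succ n ih =>
    intro a m hn hma hax h1 h2
    have halt : a < xs.length := by omega
    rw [PySem.List.pyRange_one_cons (by exact_mod_cast halt)]
    simp only [List.foldl_cons, PySem.List.pyGetD_natCast]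
    rw [show xs.getD a (0, 0) = pvG xs a from rfl, show xs.getD m (0, 0) = pvG xs m from rfl]
    split_ifs with c1 c2
    · -- new best at index a (smaller x)
      have hB : pvBetter (pvG xs a) (pvG xs m) := Or.inl c1
      have := ih (a + 1) a (by omega) (by omega) (by omega)
        (fun j hj => by
          rcases Nat.lt_succ_iff_lt_or_eq.mp hj with hj' | rfl
          · have h1j := h1 j hj'
            unfold pvBetter at hB h1j ⊢; omega
          · unfold pvBetter; omega)
        (fun j hj => by
          have h1j := h1 j hj
          unfold pvBetter at hB h1j ⊢; omega)
      simpa using this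
    · -- new best at index a (equal x, larger y)
      have hB : pvBetter (pvG xs a) (pvG xs m) := Or.inr ⟨c2.1, c2.2⟩
      have := ih (a + 1) a (by omega) (by omega) (by omega)
        (fun j hj => by
          rcases Nat.lt_succ_iff_lt_or_eq.mp hj with hj' | rfl
          · have h1j := h1 j hj'
            unfold pvBetter at hB h1j ⊢; omega
          · unfold pvBetter; omega)
        (fun j hj => by
          have h1j := h1 j hj
          unfold pvBetter at hB h1j ⊢; omega)
      simpa using this
    · -- keep m
      have := ih (a + 1) m (by omega) (by omega) (by omega)
        (fun j hj => by
          rcases Nat.lt_succ_iff_lt_or_eq.mp hj with hj' | rfl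
          · exact h1 j hj'
          · unfold pvBetter; omega)
        h2
      simpa using this

lemma A_correct (p : Int × Int) (rest : List (Int × Int)) :
    ∃ r : Nat, leftMostPoint (p :: rest) = (r : Int) ∧ pvFirstBest (p :: rest) r := by
  have h0 : ∀ j, j < 1 → ¬ pvBetter (pvG (p :: rest) j) (pvG (p :: rest) 0) := by
    intro j hj
    interval_cases j
    unfold pvBetter; omega
  have := A_loop (p :: rest) ((p :: rest).length - 1) 1 0 rfl (by omega)
    (by simp) h0 (fun j hj => absurd hj (by omega))
  obtain ⟨r, hr, hfb⟩ := this
  refine ⟨r, ?_, hfb⟩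
  rw [← hr]
  simp only [leftMostPoint, PySem.List.len_eq]
  norm_num

-- min fold: lower bound and attainment
lemma min_fold_le (l : List (Int × Int)) :
    ∀ init : Int, l.foldl (fun acc q => min acc q.1) init ≤ init ∧
      ∀ q ∈ l, l.foldl (fun acc q => min acc q.1) init ≤ q.1 := by
  induction l with
  | nil => intro init; simp
  | cons q l ih =>
    intro init
    obtain ⟨h1, h2⟩ := ih (min init q.1)
    refine ⟨le_trans h1 (min_le_left _ _), ?_⟩
    intro q' hq'
    rcases List.mem_cons.mp hq' with rfl | hq'
    · exact le_trans h1 (min_le_right _ _)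
    · exact h2 q' hq'

lemma min_fold_attained (l : List (Int × Int)) :
    ∀ init : Int, l.foldl (fun acc q => min acc q.1) init = init ∨
      ∃ q ∈ l, l.foldl (fun acc q => min acc q.1) init = q.1 := by
  induction l with
  | nil => intro init; simp
  | cons q l ih =>
    intro init
    rcases ih (min init q.1) with h | ⟨q', hq', h⟩
    · rcases min_cases init q.1 with ⟨he, _⟩ | ⟨he, _⟩
      · exact Or.inl (by rw [List.foldl_cons, h, he])
      · exact Or.inr ⟨q, List.mem_cons_self, by rw [List.foldl_cons, h, he]⟩
    · exact Or.inr ⟨q', List.mem_cons_of_mem _ hq', by simp [List.foldl_cons, h]⟩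

-- B's scan invariant
def pvInvB (xs : List (Int × Int)) (minx : Int) (k : Nat) (b : Option (Int × Int)) : Prop :=
  match b with
  | none => ∀ j, j < k → (pvG xs j).1 ≠ minx
  | some (i, y) => ∃ iN : Nat, i = (iN : Int) ∧ iN < k ∧ (pvG xs iN).1 = minx ∧
      (pvG xs iN).2 = y ∧ (∀ j, j < k → (pvG xs j).1 = minx → (pvG xs j).2 ≤ y) ∧
      (∀ j, j < iN → (pvG xs j).1 = minx → (pvG xs j).2 < y)

lemma B_loop (xs : List (Int × Int)) (minx : Int) :
    ∀ (l : List (Int × Int)) (s : Nat) (b : Option (Int × Int)),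
    xs.drop s = l → s + l.length = xs.length → pvInvB xs minx s b →
    pvInvB xs minx xs.length
      ((PySem.List.enumerate l (s : Int)).foldl
        (fun (b : Option (Int × Int)) iq =>
          if iq.2.1 == minx && (match b with | none => true | some bp => decide (bp.2 < iq.2.2))
          then some (iq.1, iq.2.2) else b) b) := by
  intro l
  induction l with
  | nil =>
    intro s b hdrop hlen hinv
    simp only [PySem.List.enumerate_nil, List.foldl_nil]
    have : s = xs.length := by simpa using hlen
    rwa [this] at hinv
  | cons q l ih =>
    intro s b hdrop hlen hinv
    have hs : s < xs.length := by simp at hlen; omega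
    have h0 : xs[s]? = some q := by
      have h1 : (xs.drop s)[0]? = some q := by rw [hdrop]; rfl
      rw [List.getElem?_drop] at h1
      simpa using h1
    have hq : pvG xs s = q := by
      simp [pvG, List.getD_eq_getElem?_getD, h0]
    have hdrop' : xs.drop (s + 1) = l := by
      rw [← List.tail_drop, hdrop]; rfl
    rw [PySem.List.enumerate_cons, List.foldl_cons]
    have hcast : (s : Int) + 1 = ((s + 1 : Nat) : Int) := by push_cast; ring
    rw [hcast]
    apply ih (s + 1) _ hdrop' (by simp at hlen ⊢; omega)
    -- establish the invariant after one step
    rcases b with _ | ⟨i, y⟩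
    · -- best so far: none
      by_cases hqx : q.1 = minx
      · rw [if_pos (by simp [hqx])]
        refine ⟨s, rfl, by omega, by rw [hq]; exact hqx, by rw [hq], ?_, ?_⟩
        · intro j hj hjx
          rcases Nat.lt_succ_iff_lt_or_eq.mp hj with hj' | rfl
          · exact absurd hjx (hinv j hj')
          · exact le_of_eq (by rw [hq])
        · intro j hj hjx
          exact absurd hjx (hinv j hj)
      · rw [if_neg (by simp [hqx])]
        intro j hj
        rcases Nat.lt_succ_iff_lt_or_eq.mp hj with hj' | rfl
        · exact hinv j hj'
        · rw [hq]; exact hqx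
    · -- best so far: some (i, y)
      obtain ⟨iN, hi, hiN, hx, hy2, hle, hlt⟩ := hinv
      by_cases hcnd : q.1 = minx ∧ y < q.2
      · rw [if_pos (by simp [hcnd.1, hcnd.2])]
        refine ⟨s, rfl, by omega, by rw [hq]; exact hcnd.1, by rw [hq], ?_, ?_⟩
        · intro j hj hjx
          rcases Nat.lt_succ_iff_lt_or_eq.mp hj with hj' | rfl
          · exact le_of_lt (lt_of_le_of_lt (hle j hj' hjx) hcnd.2)
          · exact le_of_eq (by rw [hq])
        · intro j hj hjx
          exact lt_of_le_of_lt (hle j hj hjx) hcnd.2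
      · rw [if_neg (by simpa using hcnd)]
        refine ⟨iN, hi, by omega, hx, hy2, ?_, hlt⟩
        intro j hj hjx
        rcases Nat.lt_succ_iff_lt_or_eq.mp hj with hj' | rfl
        · exact hle j hj' hjx
        · rw [hq] at hjx ⊢
          have := fun h => hcnd ⟨hjx, h⟩
          omega

lemma B_correct (p : Int × Int) (rest : List (Int × Int)) :
    ∃ r : Nat, leftMostPoint_alt (p :: rest) = (r : Int) ∧ pvFirstBest (p :: rest) r := by
  set xs := p :: rest with hxs
  set minx := rest.foldl (fun acc q => min acc q.1) p.1 with hminx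
  -- lower bound: minx ≤ every x-coordinate
  have hlb : ∀ q ∈ xs, minx ≤ q.1 := by
    intro q hq
    obtain ⟨h1, h2⟩ := min_fold_le rest p.1
    rcases List.mem_cons.mp hq with rfl | hq
    · exact h1
    · exact h2 q hq
  -- attainment: some index has x-coordinate minx
  have hatt : ∃ j, j < xs.length ∧ (pvG xs j).1 = minx := by
    have : ∃ q ∈ xs, q.1 = minx := by
      rcases min_fold_attained rest p.1 with h | ⟨q, hq, h⟩
      · exact ⟨p, List.mem_cons_self, h.symm⟩
      · exact ⟨q, List.mem_cons_of_mem _ hq, h.symm⟩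
    obtain ⟨q, hq, hqx⟩ := this
    obtain ⟨j, hj, hje⟩ := List.mem_iff_getElem.mp hq
    refine ⟨j, hj, ?_⟩
    simp [pvG, List.getD_eq_getElem?_getD, List.getElem?_eq_getElem hj, hje, hqx]
  have hloop := B_loop xs minx xs 0 none rfl (by simp) (by intro j hj; omega)
  have hnorm : ((0 : Nat) : Int) = (0 : Int) := rfl
  rw [hnorm] at hloop
  match hbest : ((PySem.List.enumerate xs (0 : Int)).foldl
        (fun (b : Option (Int × Int)) iq =>
          if iq.2.1 == minx && (match b with | none => true | some bp => decide (bp.2 < iq.2.2))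
          then some (iq.1, iq.2.2) else b) none), hloop with
  | none, hloop =>
    obtain ⟨j, hj, hjx⟩ := hatt
    rw [hbest] at hloop
    exact absurd hjx (hloop j hj)
  | some (i, y), hloop =>
    rw [hbest] at hloop
    obtain ⟨iN, hi, hiN, hx, hy, hle, hlt⟩ := hloop
    refine ⟨iN, ?_, hiN, ?_, ?_⟩
    · simp only [leftMostPoint_alt, hxs, ← hminx]
      rw [← hxs, hbest, hi]
    · intro j hj
      unfold pvBetter
      have h1 := hlb (pvG xs j) (pvG_mem hj)
      have h2 := hle j hj
      rw [hx]
      by_cases hjx : (pvG xs j).1 = minx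
      · have := h2 hjx; omega
      · omega
    · intro j hj
      unfold pvBetter
      have h1 := hlb (pvG xs j) (pvG_mem (by omega))
      rw [hx]
      by_cases hjx : (pvG xs j).1 = minx
      · have := hlt j hj hjx; omega
      · omega

-- ===== VERDICT (by name: the statement is the Claim_ definition above) =====
theorem leftMostPoint_spec : Claim_equal_leftMostPoint := by
  intro xs _
  unfold Spec_leftMostPoint
  match xs with
  | [] => rfl
  | p :: rest =>
    obtain ⟨r, hA, hfbA⟩ := A_correct p rest
    obtain ⟨r', hB, hfbB⟩ := B_correct p rest
    rw [hA, hB, pvFirstBest_uniq hfbA hfbB]
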